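-- pv_equiv track=rewrite | github.com/pHarith/AdventOfCode2024-Solutions | 9/day9sol.py | find_leftmost_free_space
-- ===== SOURCE A (Python) =====
-- def find_leftmost_free_space(disk_map, size, end):
--     for i in range(end):
--         if disk_map[i] == '.':
--             span = 1
--             while i + span < end and disk_map[i + span] == '.':
--                 span += 1
--
--             if span >= size:
--                 return i
--     return None
-- ===== SOURCE B (Python) =====
-- def find_leftmost_free_space(disk_map, size, end):
--     start = 0
--     for i in range(end):
--         if disk_map[i] != '.':
--             start = i + 1
--         elif i - start + 1 >= size:
--             return start
--     return None
-- ===== Notes on version B (the rewrite author's own statement) =====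
-- stated objective: simpler
-- what changed: A restarts an inner while-scan measuring the whole free span at each '.' index; B has no inner loop at all: a single pass keeps the start of the current '.' run in an accumulator and returns it as soon as the run length reaches size.
import Mathlib
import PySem

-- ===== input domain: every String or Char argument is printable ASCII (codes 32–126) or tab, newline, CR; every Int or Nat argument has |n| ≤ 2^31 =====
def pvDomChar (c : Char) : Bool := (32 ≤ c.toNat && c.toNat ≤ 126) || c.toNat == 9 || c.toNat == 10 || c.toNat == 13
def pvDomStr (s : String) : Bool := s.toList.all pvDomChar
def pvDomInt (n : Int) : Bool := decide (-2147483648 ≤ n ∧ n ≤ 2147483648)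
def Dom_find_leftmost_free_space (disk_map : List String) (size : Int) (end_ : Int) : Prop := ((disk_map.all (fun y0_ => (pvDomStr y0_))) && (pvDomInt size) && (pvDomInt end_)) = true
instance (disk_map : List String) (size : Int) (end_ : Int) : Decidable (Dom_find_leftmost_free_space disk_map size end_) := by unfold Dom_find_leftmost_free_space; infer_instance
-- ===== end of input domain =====

-- B replaces A's nested scan (an inner while re-measuring the whole free span at every '.' index)
-- by a single pass with an accumulator holding the start of the current '.' run; same return value.

-- ===== PORT A =====
-- inner 'while i + span < end and disk_map[i + span] == '.': span += 1' (fuel end_.toNat suffices: span grows each step)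
def pvAInner (disk_map : List String) (end_ i span : Int) : Nat → Int
  | 0 => span
  | Nat.succ f =>
    if i + span < end_ ∧ (PySem.List.pyGet? disk_map (i + span)).getD "" = "." then
      pvAInner disk_map end_ i (span + 1) f
    else span

-- 'for i in range(end): …'
def pvALoop (disk_map : List String) (size end_ : Int) : List Int → Option Int
  | [] => none
  | i :: rest =>
    if (PySem.List.pyGet? disk_map i).getD "" = "." then
      let span := pvAInner disk_map end_ i 1 end_.toNat
      if span ≥ size then some i else pvALoop disk_map size end_ rest
    else pvALoop disk_map size end_ rest

def find_leftmost_free_space (disk_map : List String) (size : Int) (end_ : Int) : Option Int :=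
  pvALoop disk_map size end_ (PySem.List.pyRange 0 end_ 1)

-- ===== PORT B =====
-- single pass: 'start' is the first index of the current run of '.'; return it when the run length reaches size
def pvBLoop (disk_map : List String) (size start : Int) : List Int → Option Int
  | [] => none
  | i :: rest =>
    if (PySem.List.pyGet? disk_map i).getD "" ≠ "." then
      pvBLoop disk_map size (i + 1) rest
    else if i - start + 1 ≥ size then some start
    else pvBLoop disk_map size start rest

def find_leftmost_free_space_alt (disk_map : List String) (size : Int) (end_ : Int) : Option Int :=
  pvBLoop disk_map size 0 (PySem.List.pyRange 0 end_ 1)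

-- ===== PRECONDITION & SPEC =====
-- Pre_ is exactly where Python A returns (no IndexError): either end_ is within the list, or some
-- '.'-run terminated strictly inside the list has length ≥ size, so A returns before scanning past the end.
def Pre_find_leftmost_free_space (disk_map : List String) (size : Int) (end_ : Int) : Prop :=
  end_ ≤ (disk_map.length : Int) ∨
    ∃ a ∈ List.range disk_map.length, ∃ b ∈ List.range disk_map.length,
      a < b ∧ size ≤ (b : Int) - (a : Int) ∧ disk_map.getD b "" ≠ "." ∧
        ∀ k ∈ List.range disk_map.length, a ≤ k → k < b → disk_map.getD k "" = "." 
instance (disk_map : List String) (size : Int) (end_ : Int) : Decidable (Pre_find_leftmost_free_space disk_map size end_) := by unfold Pre_find_leftmost_free_space; infer_instance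

def pvWitness_find_leftmost_free_space : List String × Int × Int := (["x", ".", ".", "x", ".", ".", "."], 3, 7)

def Spec_find_leftmost_free_space (disk_map : List String) (size : Int) (end_ : Int) (out : Option Int) : Prop := out = find_leftmost_free_space_alt disk_map size end_
instance (disk_map : List String) (size : Int) (end_ : Int) (out : Option Int) : Decidable (Spec_find_leftmost_free_space disk_map size end_ out) := by unfold Spec_find_leftmost_free_space; infer_instance

-- ===== CLAIM (what is proved, stated in full; the proofs are below) =====
def Claim_equal_find_leftmost_free_space : Prop := ∀ (disk_map : List String) (size : Int) (end_ : Int), Dom_find_leftmost_free_space disk_map size end_ → Pre_find_leftmost_free_space disk_map size end_ → Spec_find_leftmost_free_space disk_map size end_ (find_leftmost_free_space disk_map size end_)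

-- ===== LEMMAS AND PROOFS =====

-- proof-only helper: the absolute scan pointer matching A's inner span counter
def pvBRun (disk_map : List String) (end_ j : Int) : Nat → Int
  | 0 => j
  | Nat.succ f =>
    if j < end_ ∧ (PySem.List.pyGet? disk_map j).getD "" = "." then
      pvBRun disk_map end_ (j + 1) f
    else j

theorem pvAInner_eq_pvBRun (dm : List String) (end_ : Int) :
    ∀ (f : Nat) (i s : Int), i + pvAInner dm end_ i s f = pvBRun dm end_ (i + s) f := by
  intro f
  induction f with
  | zero => intro i s; simp [pvAInner, pvBRun]
  | succ f ih =>
    intro i s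
    simp only [pvAInner, pvBRun]
    split_ifs with h
    · have := ih i (s + 1)
      simpa [add_assoc] using this
    · rfl

theorem pvBRun_le (dm : List String) (end_ : Int) :
    ∀ (f : Nat) (j : Int), j ≤ pvBRun dm end_ j f := by
  intro f
  induction f with
  | zero => intro j; simp [pvBRun]
  | succ f ih =>
    intro j
    simp only [pvBRun]
    split_ifs with h
    · have := ih (j + 1); omega
    · omega

theorem pvBRun_run (dm : List String) (end_ : Int) :
    ∀ (f : Nat) (j k : Int), j ≤ k → k < pvBRun dm end_ j f →
      k < end_ ∧ (PySem.List.pyGet? dm k).getD "" = "." := by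
  intro f
  induction f with
  | zero => intro j k h1 h2; simp [pvBRun] at h2; omega
  | succ f ih =>
    intro j k h1 h2
    simp only [pvBRun] at h2
    split_ifs at h2 with h
    · rcases eq_or_lt_of_le h1 with rfl | hlt
      · exact h
      · exact ih (j + 1) k (by omega) h2
    · omega

theorem pvBRun_stop (dm : List String) (end_ : Int) :
    ∀ (f : Nat) (j : Int), (end_ - j).toNat ≤ f →
      pvBRun dm end_ j f < end_ → (PySem.List.pyGet? dm (pvBRun dm end_ j f)).getD "" ≠ "." := by
  intro f
  induction f with
  | zero =>
    intro j hf hlt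
    simp [pvBRun] at hlt ⊢
    omega
  | succ f ih =>
    intro j hf
    simp only [pvBRun]
    split_ifs with h
    · exact ih (j + 1) (by omega)
    · intro hlt hdot; exact h ⟨hlt, hdot⟩

-- with enough fuel, the scan from anywhere inside a run ends exactly at the run's end j
theorem pvBRun_reaches (dm : List String) (end_ j : Int)
    (hstop : j < end_ → (PySem.List.pyGet? dm j).getD "" ≠ ".") :
    ∀ (f : Nat) (j0 : Int), j0 ≤ j → (j - j0).toNat ≤ f →
      (∀ k, j0 ≤ k → k < j → k < end_ ∧ (PySem.List.pyGet? dm k).getD "" = ".") →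
      pvBRun dm end_ j0 f = j := by
  intro f
  induction f with
  | zero =>
    intro j0 h1 h2 _
    have : j0 = j := by omega
    simp [pvBRun, this]
  | succ f ih =>
    intro j0 h1 h2 hrun
    simp only [pvBRun]
    rcases eq_or_lt_of_le h1 with rfl | hlt
    · split_ifs with h
      · exact absurd h.2 (hstop h.1)
      · rfl
    · have hj0 := hrun j0 le_rfl hlt
      rw [if_pos hj0]
      exact ih (j0 + 1) (by omega) (by omega) (fun k hk1 hk2 => hrun k (by omega) hk2)

-- A's loop returns nothing on the indices strictly inside a too-short free run
theorem pvALoop_skip (dm : List String) (size end_ j : Int)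
    (hstop : j < end_ → (PySem.List.pyGet? dm j).getD "" ≠ ".") :
    ∀ (n : Nat) (i : Int), 0 ≤ i → i ≤ j → j ≤ end_ → (j - i).toNat ≤ n →
      (∀ k, i ≤ k → k < j → (PySem.List.pyGet? dm k).getD "" = ".") →
      j - i < size →
      pvALoop dm size end_ (PySem.List.pyRange i end_ 1) =
      pvALoop dm size end_ (PySem.List.pyRange j end_ 1) := by
  intro n
  induction n with
  | zero =>
    intro i h0 h1 h2 hn _ _
    have : i = j := by omega
    rw [this]
  | succ n ih =>
    intro i h0 h1 h2 hn hrun hsize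
    rcases eq_or_lt_of_le h1 with rfl | hlt
    · rfl
    · have hie : i < end_ := by omega
      rw [PySem.List.pyRange_one_cons hie]
      have hdot : (PySem.List.pyGet? dm i).getD "" = "." := hrun i le_rfl hlt
      have hspan : pvAInner dm end_ i 1 end_.toNat = j - i := by
        have h1' : i + pvAInner dm end_ i 1 end_.toNat = pvBRun dm end_ (i + 1) end_.toNat :=
          pvAInner_eq_pvBRun dm end_ end_.toNat i 1
        have h2' : pvBRun dm end_ (i + 1) end_.toNat = j :=
          pvBRun_reaches dm end_ j hstop end_.toNat (i + 1) (by omega) (by omega)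
            (fun k hk1 hk2 => ⟨by omega, hrun k (by omega) hk2⟩)
        omega
      simp only [pvALoop, hdot, if_pos, hspan, if_neg (show ¬ j - i ≥ size by omega)]
      exact ih (i + 1) (by omega) (by omega) h2 (by omega)
        (fun k hk1 hk2 => hrun k (by omega) hk2) (by omega)

-- B returns the run start once the run reaches length size, while still inside the run
theorem pvBHit (dm : List String) (size end_ i j : Int)
    (hrun : ∀ k, i ≤ k → k < j → k < end_ ∧ (PySem.List.pyGet? dm k).getD "" = ".")
    (hsz : size ≤ j - i) :
    ∀ (n : Nat) (k : Int), i ≤ k → k < j → (j - k).toNat ≤ n →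
      pvBLoop dm size i (PySem.List.pyRange k end_ 1) = some i := by
  intro n
  induction n with
  | zero => intro k h1 h2 h3; omega
  | succ n ih =>
    intro k h1 h2 h3
    obtain ⟨hke, hdot⟩ := hrun k h1 h2
    rw [PySem.List.pyRange_one_cons hke]
    simp only [pvBLoop, hdot, ne_eq, not_true_eq_false, if_false]
    split_ifs with h
    · rfl
    · exact ih (k + 1) (by omega) (by omega) (by omega)

-- B keeps start unchanged while scanning through a too-short free run
theorem pvBSkip (dm : List String) (size end_ i j : Int)
    (hrun : ∀ k, i ≤ k → k < j → k < end_ ∧ (PySem.List.pyGet? dm k).getD "" = ".")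
    (hsz : j - i < size) :
    ∀ (n : Nat) (k : Int), i ≤ k → k ≤ j → (j - k).toNat ≤ n →
      pvBLoop dm size i (PySem.List.pyRange k end_ 1) =
      pvBLoop dm size i (PySem.List.pyRange j end_ 1) := by
  intro n
  induction n with
  | zero =>
    intro k h1 h2 h3
    have : k = j := by omega
    rw [this]
  | succ n ih =>
    intro k h1 h2 h3
    rcases eq_or_lt_of_le h2 with rfl | hlt
    · rfl
    · obtain ⟨hke, hdot⟩ := hrun k h1 hlt
      rw [PySem.List.pyRange_one_cons hke]
      simp only [pvBLoop, hdot, ne_eq, not_true_eq_false, if_false]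
      rw [if_neg (show ¬ k - i + 1 ≥ size by omega)]
      exact ih (k + 1) (by omega) (by omega) (by omega)

-- main lemma: from any index i (with B's run-start accumulator equal to i), the loops agree
theorem pvMain (dm : List String) (size end_ : Int) :
    ∀ (f : Nat) (i : Int), 0 ≤ i → (end_ - i).toNat < f →
      pvALoop dm size end_ (PySem.List.pyRange i end_ 1) =
      pvBLoop dm size i (PySem.List.pyRange i end_ 1) := by
  intro f
  induction f with
  | zero => intro i _ hf; omega
  | succ f ih =>
    intro i h0 hf
    by_cases hie : i < end_
    · rw [PySem.List.pyRange_one_cons hie]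
      by_cases hdot : (PySem.List.pyGet? dm i).getD "" = "."
      · simp only [pvALoop, pvBLoop, hdot, if_pos, ne_eq, not_true_eq_false, if_false]
        set j := pvBRun dm end_ i end_.toNat with hj
        have hfuel : (end_ - i).toNat ≤ end_.toNat := by omega
        have hij : i ≤ j := pvBRun_le dm end_ end_.toNat i
        have hstop : j < end_ → (PySem.List.pyGet? dm j).getD "" ≠ "." :=
          pvBRun_stop dm end_ end_.toNat i hfuel
        have hilt : i < j := by
          by_contra hcon
          have hj_eq : j = i := by omega
          have hs := hstop
          rw [hj_eq] at hs
          exact hs hie hdot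
        have hrun : ∀ k, i ≤ k → k < j → k < end_ ∧ (PySem.List.pyGet? dm k).getD "" = "." :=
          fun k hk1 hk2 => pvBRun_run dm end_ end_.toNat i k hk1 hk2
        have hje : j ≤ end_ := by have := hrun (j - 1) (by omega) (by omega); omega
        have hspan : pvAInner dm end_ i 1 end_.toNat = j - i := by
          have h1' : i + pvAInner dm end_ i 1 end_.toNat = pvBRun dm end_ (i + 1) end_.toNat :=
            pvAInner_eq_pvBRun dm end_ end_.toNat i 1
          have h2' : pvBRun dm end_ (i + 1) end_.toNat = j :=
            pvBRun_reaches dm end_ j hstop end_.toNat (i + 1) (by omega) (by omega)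
              (fun k hk1 hk2 => hrun k (by omega) hk2)
          omega
        rw [hspan]
        by_cases hsz : j - i ≥ size
        · rw [if_pos hsz]
          by_cases hfirst : i - i + 1 ≥ size
          · rw [if_pos hfirst]
          · rw [if_neg hfirst]
            exact (pvBHit dm size end_ i j hrun (by omega) (j - (i + 1)).toNat (i + 1)
              (by omega) (by omega) (by omega)).symm
        · rw [if_neg hsz, if_neg (show ¬ i - i + 1 ≥ size by omega)]
          have hA := pvALoop_skip dm size end_ j hstop (j - (i + 1)).toNat (i + 1)
            (by omega) (by omega) hje (by omega)
            (fun k hk1 hk2 => (hrun k (by omega) hk2).2) (by omega)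
          have hB := pvBSkip dm size end_ i j hrun (by omega) (j - (i + 1)).toNat (i + 1)
            (by omega) (by omega) (by omega)
          rw [hA, hB]
          by_cases hjend : j < end_
          · rw [PySem.List.pyRange_one_cons hjend]
            have hjd := hstop hjend
            simp only [pvALoop, pvBLoop, hjd, ne_eq, not_false_eq_true, if_true, if_false]
            exact ih (j + 1) (by omega) (by omega)
          · rw [PySem.List.pyRange_one_eq_nil (by omega)]
            rfl
      · simp only [pvALoop, pvBLoop, hdot, ne_eq, not_false_eq_true, if_true, if_false]
        exact ih (i + 1) (by omega) (by omega)
    · rw [PySem.List.pyRange_one_eq_nil (by omega)]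
      rfl

-- ===== VERDICT (by name: the statement is the Claim_ definition above) =====
theorem find_leftmost_free_space_spec : Claim_equal_find_leftmost_free_space := by
  intro dm size end_ _ _
  unfold Spec_find_leftmost_free_space find_leftmost_free_space find_leftmost_free_space_alt
  exact pvMain dm size end_ (end_.toNat + 1) 0 le_rfl (by omega)
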